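-- pv_equiv track=rewrite | github.com/harrisoneanthony/stack_2 | lecture/week 7/algo.py | input_string
-- ===== SOURCE A (Python) =====
-- def input_string(input):
--     parentheses = True
--     for i in input:
--         if i == "(":
--             parentheses = True
--         elif i == ")":
--             parentheses = False
--     if parentheses:
--         return True
--     else:
--         return False
-- ===== SOURCE B (Python) =====
-- def input_string(input):
--     for i in reversed(input):
--         if i == "(":
--             return True
--         if i == ")":
--             return False
--     return True
-- ===== Notes on version B (the rewrite author's own statement) =====
-- stated objective: simpler
-- what changed: B scans the string backwards and returns at the first parenthesis found (True for '(', False for ')'), dropping A's accumulated boolean state and full forward pass.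
import Mathlib
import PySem

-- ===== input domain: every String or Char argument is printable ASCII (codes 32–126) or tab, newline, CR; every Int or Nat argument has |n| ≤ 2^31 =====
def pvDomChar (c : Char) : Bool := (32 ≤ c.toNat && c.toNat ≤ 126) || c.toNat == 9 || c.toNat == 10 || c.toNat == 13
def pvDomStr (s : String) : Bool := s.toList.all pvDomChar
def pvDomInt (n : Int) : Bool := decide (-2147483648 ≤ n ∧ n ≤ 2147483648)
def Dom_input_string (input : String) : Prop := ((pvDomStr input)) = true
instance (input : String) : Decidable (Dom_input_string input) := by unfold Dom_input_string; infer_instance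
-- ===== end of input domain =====

-- B scans backwards with early exit instead of A's forward pass with accumulated boolean state (objective: simpler).

-- ===== PORT A =====
def input_string (input : String) : Bool :=
  let parentheses := input.toList.foldl
    (fun parentheses i => if i = '(' then true else if i = ')' then false else parentheses) true
  if parentheses then true else false

-- ===== PORT B =====
-- reverse scan: first parenthesis from the end decides
def pvRevScan : List Char → Bool
  | [] => true
  | i :: rest => if i = '(' then true else if i = ')' then false else pvRevScan rest

def input_string_alt (input : String) : Bool := pvRevScan input.toList.reverse

-- ===== PRECONDITION & SPEC =====
def Spec_input_string (input : String) (out : Bool) : Prop := out = input_string_alt input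
instance (input : String) (out : Bool) : Decidable (Spec_input_string input out) := by unfold Spec_input_string; infer_instance

-- ===== CLAIM (what is proved, stated in full; the proofs are below) =====
def Claim_equal_input_string : Prop := ∀ (input : String), Dom_input_string input → Spec_input_string input (input_string input)

-- ===== LEMMAS AND PROOFS =====
-- generalized reverse scan: returns p when no parenthesis is found
def pvRevScanW (p : Bool) : List Char → Bool
  | [] => p
  | i :: rest => if i = '(' then true else if i = ')' then false else pvRevScanW p rest

theorem pvRevScanW_append (p : Bool) (xs : List Char) (c : Char) :
    pvRevScanW p (xs ++ [c]) =
      pvRevScanW (if c = '(' then true else if c = ')' then false else p) xs := by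
  induction xs with
  | nil => simp [pvRevScanW]
  | cons a xs ih => simp [pvRevScanW, ih]

theorem foldl_eq_revScanW (l : List Char) (p : Bool) :
    l.foldl (fun parentheses i =>
      if i = '(' then true else if i = ')' then false else parentheses) p
      = pvRevScanW p l.reverse := by
  induction l generalizing p with
  | nil => simp [pvRevScanW]
  | cons a l ih => rw [List.foldl_cons, ih, List.reverse_cons, pvRevScanW_append]

theorem revScanW_true_eq_revScan (l : List Char) : pvRevScanW true l = pvRevScan l := by
  induction l with
  | nil => rfl
  | cons a l ih => simp [pvRevScanW, pvRevScan, ih]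

-- ===== VERDICT (by name: the statement is the Claim_ definition above) =====
theorem input_string_spec : Claim_equal_input_string := by
  intro input _
  unfold Spec_input_string input_string input_string_alt
  rw [foldl_eq_revScanW, revScanW_true_eq_revScan]
  simp
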